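-- pv_equiv track=rewrite | github.com/jonddeck/Sorting-Algorithms | Overview/all_sorts_visualizer.py | track_counting
-- ===== SOURCE A (Python) =====
-- def track_counting(arr):
--     if not arr:
--         return [[]], [[]]
--     a = list(arr)
--     steps = [a.copy()]
--     highlights = [[]]
--     mn, mx = min(a), max(a)
--     c = [0] * (mx - mn + 1)
--     for i, v in enumerate(a):
--         c[v - mn] += 1
--     out = [0] * len(a)
--     k = 0
--     for i, cnt in enumerate(c):
--         for _ in range(cnt):
--             out[k] = i + mn
--             steps.append(out.copy())
--             highlights.append([k])
--             k += 1
--     return steps, highlights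
-- ===== SOURCE B (Python) =====
-- def track_counting(arr):
--     if not arr:
--         return [[]], [[]]
--     a = list(arr)
--     mn, mx = min(a), max(a)
--     c = [0] * (mx - mn + 1)
--     for v in a:
--         c[v - mn] += 1
--     sorted_vals = []
--     for i, cnt in enumerate(c):
--         sorted_vals += [i + mn] * cnt
--     n = len(a)
--     steps = [a.copy()] + [sorted_vals[:k + 1] + [0] * (n - k - 1) for k in range(n)]
--     highlights = [[]] + [[k] for k in range(n)]
--     return steps, highlights
-- ===== Notes on version B (the rewrite author's own statement) =====
-- stated objective: alternative
-- what changed: B first materializes the fully sorted array by expanding the counts, then generates every snapshot independently as a sorted prefix slice padded with zeros, instead of mutating one shared output array in place inside the placement loop.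
import Mathlib
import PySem

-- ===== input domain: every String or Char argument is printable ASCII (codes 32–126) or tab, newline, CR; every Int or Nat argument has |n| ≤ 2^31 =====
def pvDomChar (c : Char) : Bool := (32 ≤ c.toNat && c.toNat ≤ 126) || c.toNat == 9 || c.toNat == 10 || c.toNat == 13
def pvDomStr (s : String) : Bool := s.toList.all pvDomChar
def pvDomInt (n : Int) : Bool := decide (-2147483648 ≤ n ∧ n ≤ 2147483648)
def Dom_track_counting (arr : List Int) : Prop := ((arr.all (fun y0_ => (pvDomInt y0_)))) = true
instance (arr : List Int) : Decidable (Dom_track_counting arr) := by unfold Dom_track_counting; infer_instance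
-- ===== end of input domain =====

-- B builds the fully sorted array from the counts first and emits each snapshot as a
-- prefix slice padded with zeros, instead of mutating one shared output array in place.

-- ===== PORT A =====
-- min(a)/max(a) on the nonempty list x :: t are the running fold (PySem.List.min?_id_cons / max?_id_cons);
-- [0]*(mx-mn+1) and [0]*len(a) are PySem.List.pyRepeat; all indexing uses PySem pyGetD/pySetD
-- (exact here: 0 ≤ v-mn < len c and 0 ≤ k < len out throughout).
def track_counting (arr : List Int) : List (List Int) × List (List Int) :=
  match arr with
  | [] => ([[]], [[]])
  | x :: t =>
    let a := x :: t
    let steps : List (List Int) := [a]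
    let highlights : List (List Int) := [[]]
    let mn := t.foldl min x
    let mx := t.foldl max x
    let c0 : List Int := PySem.List.pyRepeat [0] (mx - mn + 1)
    let c := (PySem.List.enumerate a).foldl
      (fun c iv => PySem.List.pySetD c (iv.2 - mn) (PySem.List.pyGetD c (iv.2 - mn) 0 + 1)) c0
    let out : List Int := PySem.List.pyRepeat [0] (a.length : Int)
    -- 'for i, cnt in enumerate(c)': Python's enumerate is a lazy counter, ported as a
    -- fold over c carrying the index i (acc.2) alongside the loop state acc.1
    let st := (c.foldl
      (fun (acc : (List Int × List (List Int) × List (List Int) × Int) × Int) cnt =>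
        ((PySem.List.pyRange 0 cnt 1).foldl
          (fun (st : List Int × List (List Int) × List (List Int) × Int) _ =>
            let out' := PySem.List.pySetD st.1 st.2.2.2 (acc.2 + mn)
            (out', st.2.1 ++ [out'], st.2.2.1 ++ [[st.2.2.2]], st.2.2.2 + 1))
          acc.1,
         acc.2 + 1))
      ((out, steps, highlights, 0), 0)).1
    (st.2.1, st.2.2.1)

-- ===== PORT B =====
-- sorted_vals[:k+1] is PySem.List.slice; [i+mn]*cnt and [0]*(n-k-1) are PySem.List.pyRepeat.
def track_counting_alt (arr : List Int) : List (List Int) × List (List Int) :=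
  match arr with
  | [] => ([[]], [[]])
  | x :: t =>
    let a := x :: t
    let mn := t.foldl min x
    let mx := t.foldl max x
    let c0 : List Int := PySem.List.pyRepeat [0] (mx - mn + 1)
    let c := a.foldl
      (fun c v => PySem.List.pySetD c (v - mn) (PySem.List.pyGetD c (v - mn) 0 + 1)) c0
    -- 'for i, cnt in enumerate(c)': same lazy-counter rendering of enumerate
    let sv := (c.foldl
      (fun (p : List Int × Int) cnt => (p.1 ++ PySem.List.pyRepeat [p.2 + mn] cnt, p.2 + 1))
      ([], 0)).1
    let n := a.length
    let steps := [a] ++ (PySem.List.pyRange 0 (n : Int) 1).map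
      (fun k => PySem.List.slice sv none (some (k + 1)) ++ PySem.List.pyRepeat [0] ((n : Int) - k - 1))
    let highlights := [([] : List Int)] ++ (PySem.List.pyRange 0 (n : Int) 1).map (fun k => [k])
    (steps, highlights)

-- ===== PRECONDITION & SPEC =====
def Spec_track_counting (arr : List Int) (out : List (List Int) × List (List Int)) : Prop := out = track_counting_alt arr
instance (arr : List Int) (out : List (List Int) × List (List Int)) : Decidable (Spec_track_counting arr out) := by unfold Spec_track_counting; infer_instance

-- ===== CLAIM (what is proved, stated in full; the proofs are below) =====
def Claim_equal_track_counting : Prop := ∀ (arr : List Int), Dom_track_counting arr → Spec_track_counting arr (track_counting arr)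

-- ===== LEMMAS AND PROOFS =====

-- one step / whole inner loop / whole placement loop of A, characterized by the
-- prefix sv of sorted values placed so far
theorem pvSetAppend {α : Type} (l : List α) (y x : α) (r : List α) :
    (l ++ y :: r).set l.length x = l ++ x :: r := by
  induction l with
  | nil => rfl
  | cons h t ih => simp [ih]

theorem pvSumToNatSet (c : List Int) (j : Nat) (hj : j < c.length) (hnn : 0 ≤ c.getD j 0) :
    ((c.set j (c.getD j 0 + 1)).map Int.toNat).sum = (c.map Int.toNat).sum + 1 := by
  induction c generalizing j with
  | nil => simp at hj
  | cons h t ih =>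
    cases j with
    | zero => simp at hnn ⊢; omega
    | succ j =>
      simp only [List.getD_cons_succ, List.set_cons_succ, List.map_cons, List.sum_cons]
      rw [ih j (by simpa using hj) hnn]
      omega

theorem pvCountFold (mn : Int) (vs : List Int) : ∀ (c : List Int),
    (∀ y ∈ c, 0 ≤ y) →
    (∀ v ∈ vs, 0 ≤ v - mn ∧ (v - mn).toNat < c.length) →
    (vs.foldl (fun c v => PySem.List.pySetD c (v - mn) (PySem.List.pyGetD c (v - mn) 0 + 1)) c).length = c.length ∧
    (∀ y ∈ vs.foldl (fun c v => PySem.List.pySetD c (v - mn) (PySem.List.pyGetD c (v - mn) 0 + 1)) c, 0 ≤ y) ∧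
    ((vs.foldl (fun c v => PySem.List.pySetD c (v - mn) (PySem.List.pyGetD c (v - mn) 0 + 1)) c).map Int.toNat).sum
      = (c.map Int.toNat).sum + vs.length := by
  induction vs with
  | nil => intro c h1 h2; exact ⟨rfl, h1, by simp⟩
  | cons v vs ih =>
    intro c hnn hvs
    obtain ⟨hv0, hvlt⟩ := hvs v (by simp)
    have hset : PySem.List.pySetD c (v - mn) (PySem.List.pyGetD c (v - mn) 0 + 1)
        = c.set (v - mn).toNat (c.getD (v - mn).toNat 0 + 1) := by
      rw [PySem.List.pySetD_of_nonneg c _ hv0]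
      rw [PySem.List.pyGetD_eq_getElem c _ hv0 (by omega), List.getD_eq_getElem c 0 hvlt]
    simp only [List.foldl_cons, hset]
    have hlen := List.length_set (as := c) (i := (v - mn).toNat) (a := c.getD (v - mn).toNat 0 + 1)
    have hnn' : ∀ y ∈ c.set (v - mn).toNat (c.getD (v - mn).toNat 0 + 1), 0 ≤ y := by
      intro y hy
      rcases List.mem_or_eq_of_mem_set hy with h | h
      · exact hnn y h
      · have hmem : c.getD (v - mn).toNat 0 ∈ c := by
          rw [List.getD_eq_getElem c 0 hvlt]; exact List.getElem_mem hvlt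
        have := hnn _ hmem
        omega
    obtain ⟨l1, l2, l3⟩ := ih (c.set (v - mn).toNat (c.getD (v - mn).toNat 0 + 1))
      hnn' (by intro w hw; rw [hlen]; exact hvs w (by simp [hw]))
    refine ⟨by rw [l1, hlen], l2, ?_⟩
    have hmem : c.getD (v - mn).toNat 0 ∈ c := by
      rw [List.getD_eq_getElem c 0 hvlt]; exact List.getElem_mem hvlt
    rw [l3, pvSumToNatSet c _ hvlt (hnn _ hmem)]
    simp; omega

def pvMk (a : List Int) (n : Nat) (sv : List Int) :
    List Int × List (List Int) × List (List Int) × Int :=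
  (sv ++ List.replicate (n - sv.length) 0,
   a :: (List.range sv.length).map (fun j => sv.take (j + 1) ++ List.replicate (n - (j + 1)) 0),
   [] :: (List.range sv.length).map (fun j => [(j : Int)]),
   (sv.length : Int))

theorem pvStep (a : List Int) (n : Nat) (sv : List Int) (x : Int) (h : sv.length < n) :
    (PySem.List.pySetD (pvMk a n sv).1 (pvMk a n sv).2.2.2 x,
     (pvMk a n sv).2.1 ++ [PySem.List.pySetD (pvMk a n sv).1 (pvMk a n sv).2.2.2 x],
     (pvMk a n sv).2.2.1 ++ [[(pvMk a n sv).2.2.2]],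
     (pvMk a n sv).2.2.2 + 1) = pvMk a n (sv ++ [x]) := by
  have hrep : List.replicate (n - sv.length) (0 : Int)
      = 0 :: List.replicate (n - (sv.length + 1)) 0 := by
    rw [show n - sv.length = (n - (sv.length + 1)) + 1 by omega, List.replicate_succ]
  have hout : PySem.List.pySetD (pvMk a n sv).1 (pvMk a n sv).2.2.2 x
      = (sv ++ [x]) ++ List.replicate (n - (sv.length + 1)) 0 := by
    show PySem.List.pySetD (sv ++ List.replicate (n - sv.length) 0) ((sv.length : Int)) x = _
    rw [PySem.List.pySetD_natCast, hrep, pvSetAppend]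
    simp
  have hcongr : List.map (fun j => sv.take (j + 1) ++ List.replicate (n - (j + 1)) (0 : Int)) (List.range sv.length)
      = List.map (fun j => (sv ++ [x]).take (j + 1) ++ List.replicate (n - (j + 1)) 0) (List.range sv.length) := by
    apply List.map_congr_left
    intro j hj
    rw [List.take_append_of_le_length (by simp only [List.mem_range] at hj; omega)]
  refine Prod.ext ?_ (Prod.ext ?_ (Prod.ext ?_ ?_))
  · rw [hout]
    show _ = (sv ++ [x]) ++ List.replicate (n - (sv ++ [x]).length) 0
    simp
  · show (a :: _) ++ [PySem.List.pySetD (pvMk a n sv).1 (pvMk a n sv).2.2.2 x]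
        = a :: List.map (fun j => (sv ++ [x]).take (j + 1) ++ List.replicate (n - (j + 1)) 0)
            (List.range (sv ++ [x]).length)
    rw [hout, List.length_append, List.length_singleton, List.range_succ, List.map_append,
        List.cons_append, hcongr]
    simp only [List.map_cons, List.map_nil]
    congr 3
    rw [List.take_of_length_le (by simp)]
  · simp only [pvMk]
    simp [List.range_succ]
  · simp only [pvMk]
    simp

theorem pvInner (a : List Int) (n : Nat) (x : Int) (l : List Int) : ∀ (sv : List Int),
    sv.length + l.length ≤ n →
    l.foldl (fun st (_ : Int) =>
        (PySem.List.pySetD st.1 st.2.2.2 x,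
         st.2.1 ++ [PySem.List.pySetD st.1 st.2.2.2 x],
         st.2.2.1 ++ [[st.2.2.2]],
         st.2.2.2 + 1)) (pvMk a n sv)
      = pvMk a n (sv ++ List.replicate l.length x) := by
  induction l with
  | nil => intro sv h; simp
  | cons e l ih =>
    intro sv h
    simp only [List.length_cons] at h
    simp only [List.foldl_cons, List.length_cons]
    rw [show ((PySem.List.pySetD (pvMk a n sv).1 (pvMk a n sv).2.2.2 x,
         (pvMk a n sv).2.1 ++ [PySem.List.pySetD (pvMk a n sv).1 (pvMk a n sv).2.2.2 x],
         (pvMk a n sv).2.2.1 ++ [[(pvMk a n sv).2.2.2]],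
         (pvMk a n sv).2.2.2 + 1)) = pvMk a n (sv ++ [x]) from pvStep a n sv x (by omega)]
    rw [ih (sv ++ [x]) (by simp; omega)]
    congr 1
    simp [List.replicate_succ]

theorem pvExpandFold (mn : Int) (cs : List Int) : ∀ (acc : List Int) (i0 : Int),
    (cs.foldl (fun (p : List Int × Int) cnt => (p.1 ++ PySem.List.pyRepeat [p.2 + mn] cnt, p.2 + 1)) (acc, i0)).1
      = acc ++ (PySem.List.enumerate cs i0).flatMap (fun p => List.replicate p.2.toNat (p.1 + mn)) := by
  induction cs with
  | nil => intro acc i0; simp [PySem.List.enumerate_nil]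
  | cons cnt cs ih =>
    intro acc i0
    simp only [List.foldl_cons, PySem.List.enumerate_cons, List.flatMap_cons]
    rw [ih, PySem.List.pyRepeat_singleton, List.append_assoc]

theorem pvOuter (a : List Int) (n : Nat) (mn : Int) (cs : List Int) : ∀ (sv : List Int) (i0 : Int),
    sv.length + (cs.map Int.toNat).sum ≤ n →
    (cs.foldl (fun (acc : (List Int × List (List Int) × List (List Int) × Int) × Int) cnt =>
        ((PySem.List.pyRange 0 cnt 1).foldl
          (fun (st : List Int × List (List Int) × List (List Int) × Int) (_ : Int) =>
            (PySem.List.pySetD st.1 st.2.2.2 (acc.2 + mn),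
             st.2.1 ++ [PySem.List.pySetD st.1 st.2.2.2 (acc.2 + mn)],
             st.2.2.1 ++ [[st.2.2.2]],
             st.2.2.2 + 1)) acc.1,
         acc.2 + 1)) (pvMk a n sv, i0)).1
      = pvMk a n (sv ++ (PySem.List.enumerate cs i0).flatMap (fun p => List.replicate p.2.toNat (p.1 + mn))) := by
  induction cs with
  | nil => intro sv i0 h; simp [PySem.List.enumerate_nil]
  | cons cnt cs ih =>
    intro sv i0 h
    simp only [List.map_cons, List.sum_cons] at h
    simp only [List.foldl_cons, PySem.List.enumerate_cons, List.flatMap_cons]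
    rw [pvInner a n (i0 + mn) (PySem.List.pyRange 0 cnt 1) sv
        (by rw [PySem.List.length_pyRange_one]; simp; omega)]
    rw [PySem.List.length_pyRange_one, Int.sub_zero]
    rw [ih (sv ++ List.replicate cnt.toNat (i0 + mn)) (i0 + 1) (by simp; omega)]
    rw [List.append_assoc]

theorem pvEnumFold {β : Type} (a : List Int) (F : β → Int → β) (c0 : β) :
    (PySem.List.enumerate a).foldl (fun c iv => F c iv.2) c0 = a.foldl F c0 := by
  conv_rhs => rw [← PySem.List.map_snd_enumerate a 0]
  rw [List.foldl_map]

theorem track_counting_spec' (x : Int) (t : List Int) :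
    track_counting (x :: t) = track_counting_alt (x :: t) := by
  simp only [track_counting, track_counting_alt]
  have hmn : ∀ v ∈ x :: t, t.foldl min x ≤ v :=
    PySem.List.min?_isMin (PySem.List.min?_id_cons x t)
  have hmx : ∀ v ∈ x :: t, v ≤ t.foldl max x :=
    PySem.List.max?_isMax (PySem.List.max?_id_cons x t)
  have hmnmx : t.foldl min x ≤ t.foldl max x :=
    le_trans (hmn x (by simp)) (hmx x (by simp))
  set mn := t.foldl min x with hmn_def
  set mx := t.foldl max x with hmx_def
  set c0 : List Int := PySem.List.pyRepeat [0] (mx - mn + 1) with hc0_def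
  have hc0 : c0 = List.replicate (mx - mn + 1).toNat 0 := PySem.List.pyRepeat_singleton 0 _
  have hc0nn : ∀ y ∈ c0, 0 ≤ y := by rw [hc0]; intro y hy; simp at hy; omega
  have hc0sum : (c0.map Int.toNat).sum = 0 := by rw [hc0]; simp
  have hc0len : c0.length = (mx - mn + 1).toNat := by rw [hc0]; simp
  have hvs : ∀ v ∈ x :: t, 0 ≤ v - mn ∧ (v - mn).toNat < c0.length := by
    intro v hv
    have h1 := hmn v hv
    have h2 := hmx v hv
    rw [hc0len]
    omega
  obtain ⟨hclen, hcnn, hcsum⟩ := pvCountFold mn (x :: t) c0 hc0nn hvs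
  set F := fun (c : List Int) (v : Int) =>
    PySem.List.pySetD c (v - mn) (PySem.List.pyGetD c (v - mn) 0 + 1) with hF_def
  have henum : (PySem.List.enumerate (x :: t)).foldl (fun c iv => F c iv.2) c0
      = (x :: t).foldl F c0 := pvEnumFold (x :: t) F c0
  set c : List Int := (x :: t).foldl F c0 with hc_def
  set n : Nat := (x :: t).length with hn_def
  have hsum : (c.map Int.toNat).sum = n := by rw [hcsum, hc0sum]; exact Nat.zero_add n
  -- the B-side sorted values
  set sv : List Int := (c.foldl
      (fun (p : List Int × Int) cnt => (p.1 ++ PySem.List.pyRepeat [p.2 + mn] cnt, p.2 + 1))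
      ([], 0)).1 with hsv_def
  have hsv : sv = (PySem.List.enumerate c).flatMap
      (fun p => List.replicate p.2.toNat (p.1 + mn)) := by
    rw [hsv_def, pvExpandFold, List.nil_append]
  have hsvlen : sv.length = n := by
    rw [hsv, List.length_flatMap]
    rw [show (List.map (fun a => (List.replicate a.2.toNat (a.1 + mn)).length) (PySem.List.enumerate c))
        = ((PySem.List.enumerate c).map (fun p => p.2)).map Int.toNat by rw [List.map_map]; simp]
    rw [PySem.List.map_snd_enumerate c 0]
    exact hsum
  -- initial state of A's placement loop is pvMk (x::t) n []
  have hinit : (PySem.List.pyRepeat ([0] : List Int) ((x :: t).length : Int),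
      ([x :: t] : List (List Int)), ([[]] : List (List Int)), (0 : Int))
      = pvMk (x :: t) n [] := by
    simp [pvMk, PySem.List.pyRepeat_singleton, hn_def]
  rw [henum, hinit]
  rw [pvOuter (x :: t) n mn c [] 0 (by rw [hsum]; simp)]
  rw [show ([] : List Int) ++ (PySem.List.enumerate c).flatMap
      (fun p => List.replicate p.2.toNat (p.1 + mn)) = sv from by rw [hsv]; simp]
  -- now compare components with B's slice-based construction
  simp only [pvMk, hsvlen]
  refine Prod.ext ?_ ?_
  · rw [PySem.List.pyRange_one, List.map_map]
    simp only [List.cons_append, List.nil_append, List.cons.injEq, true_and]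
    apply List.map_congr_left
    intro j hj
    simp only [Function.comp_apply] at *
    rw [PySem.List.slice_to sv (by omega), PySem.List.pyRepeat_singleton]
    congr 1
    · congr 1; omega
    · congr 1; omega
  · show ([] : List Int) :: _ = _
    rw [PySem.List.pyRange_one, List.map_map]
    simp only [List.pure_def, List.bind_eq_flatMap]
    rw [← List.map_eq_flatMap, List.map_map]
    simp [List.map_map]

-- ===== VERDICT (by name: the statement is the Claim_ definition above) =====
theorem track_counting_spec : Claim_equal_track_counting := by
  intro arr _
  unfold Spec_track_counting
  cases arr with
  | nil => rfl
  | cons x t => exact track_counting_spec' x t
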